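-- pv_equiv track=rewrite | github.com/CurLeaf/privacy_query_engine | main/evaluation/privacy_metrics.py | check
-- ===== SOURCE A (Python) =====
-- from typing import Any, Dict, List, Optional, Set
--
-- def check(
--
--     data: List[Dict[str, Any]],
--     quasi_identifiers: List[str],
--     sensitive_attribute: str,
-- ) -> int:
--     """
--     检查数据的 L-多样性级别
--
--     Args:
--         data: 数据列表
--         quasi_identifiers: 准标识符列表
--         sensitive_attribute: 敏感属性
--
--     Returns:
--         L 值（每个等价类中敏感属性的最小不同值数量）
--     """
--     if not data or not quasi_identifiers or not sensitive_attribute: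
--         return 0
--
--     # 计算等价类
--     classes = {}
--     for i, row in enumerate(data):
--         key = tuple(row.get(qi) for qi in quasi_identifiers)
--         if key not in classes:
--             classes[key] = []
--         classes[key].append(i)
--
--     if not classes:
--         return 0
--
--     # 计算每个等价类的敏感属性多样性
--     min_diversity = float('inf')
--     for key, row_indices in classes.items():
--         sensitive_values = set()
--         for idx in row_indices:
--             val = data[idx].get(sensitive_attribute)
--             if val is not None:
--                 sensitive_values.add(val)
--
--         diversity = len(sensitive_values)
--         min_diversity = min(min_diversity, diversity)
--
--     return int(min_diversity) if min_diversity != float('inf') else 0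
-- ===== SOURCE B (Python) =====
-- def check(data, quasi_identifiers, sensitive_attribute):
--     if not data or not quasi_identifiers or not sensitive_attribute:
--         return 0
--     best = None
--     for row in data:
--         key = tuple(row.get(qi) for qi in quasi_identifiers)
--         values = set()
--         for other in data:
--             if tuple(other.get(qi) for qi in quasi_identifiers) == key:
--                 v = other.get(sensitive_attribute)
--                 if v is not None:
--                     values.add(v)
--         d = len(values)
--         if best is None or d < best:
--             best = d
--     return best
-- ===== Notes on version B (the rewrite author's own statement) =====
-- stated objective: alternative
-- what changed: B drops the grouping dict entirely: for each row it brute-force rescans all of data to collect the distinct non-None sensitive values of rows sharing its quasi-identifier key, tracking the running minimum; correct because the minimum over classes equals the minimum over rows of their own class's diversity.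
import Mathlib
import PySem

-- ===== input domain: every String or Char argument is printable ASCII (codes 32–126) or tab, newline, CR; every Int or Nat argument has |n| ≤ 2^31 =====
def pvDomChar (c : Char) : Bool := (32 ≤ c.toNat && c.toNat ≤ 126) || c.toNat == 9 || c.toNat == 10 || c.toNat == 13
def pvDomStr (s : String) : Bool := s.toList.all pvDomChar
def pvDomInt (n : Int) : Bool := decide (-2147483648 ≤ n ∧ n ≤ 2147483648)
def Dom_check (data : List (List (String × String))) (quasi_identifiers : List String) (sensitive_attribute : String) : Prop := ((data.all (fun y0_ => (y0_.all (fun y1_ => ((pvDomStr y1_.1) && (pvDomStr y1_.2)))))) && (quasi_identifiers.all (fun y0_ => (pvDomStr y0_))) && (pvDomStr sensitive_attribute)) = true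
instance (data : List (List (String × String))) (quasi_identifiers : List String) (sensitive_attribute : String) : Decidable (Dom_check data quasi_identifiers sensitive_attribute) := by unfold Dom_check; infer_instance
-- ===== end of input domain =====

-- B replaces A's dict-of-index-lists grouping with a brute-force nested rescan of `data`
-- per row (no auxiliary table), tracking the running minimum diversity; same return value.

-- ===== PORT A =====
-- key = tuple(row.get(qi) for qi in quasi_identifiers)
def pvKey (quasi_identifiers : List String) (row : List (String × String)) : List (Option String) :=
  quasi_identifiers.map (fun qi => (PySem.Dict.mk row).get? qi)

-- 'val = data[idx].get(sa); if val is not None: sensitive_values.add(val)'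
def pvAddSens (sensitive_attribute : String) (row : List (String × String)) (s : PySem.Set String) : PySem.Set String :=
  match (PySem.Dict.mk row).get? sensitive_attribute with
  | some v => PySem.Set.add s v
  | none => s

-- A's first loop: classes[key] = [] if absent, then classes[key].append(i)
def pvClassesA (data : List (List (String × String))) (quasi_identifiers : List String) :
    PySem.Dict (List (Option String)) (List Int) :=
  (PySem.List.enumerate data).foldl
    (fun cl p => cl.modify (pvKey quasi_identifiers p.2) [] (fun l => l ++ [p.1]))
    PySem.Dict.empty

def check (data : List (List (String × String))) (quasi_identifiers : List String) (sensitive_attribute : String) : Int :=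
  if data = [] ∨ quasi_identifiers = [] ∨ sensitive_attribute = "" then 0
  else
    let classes := pvClassesA data quasi_identifiers
    if classes.items = [] then 0
    else
      -- min_diversity = float('inf') is modelled as Option Int (none = inf)
      let m := classes.items.foldl
        (fun m p =>
          let d := PySem.Set.len
            (p.2.foldl
              (fun s idx => pvAddSens sensitive_attribute (PySem.List.pyGetD data idx []) s)
              PySem.Set.empty)
          match m with
          | none => some d
          | some m0 => some (min m0 d))
        none
      match m with
      | none => 0
      | some m0 => m0

-- ===== PORT B =====
-- brute force: for each row, rescan data for rows with the same key, collect distinct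
-- non-None sensitive values, keep the running minimum (best = None until the first row)
def check_alt (data : List (List (String × String))) (quasi_identifiers : List String) (sensitive_attribute : String) : Int :=
  if data = [] ∨ quasi_identifiers = [] ∨ sensitive_attribute = "" then 0
  else
    (data.foldl
      (fun best row =>
        let key := quasi_identifiers.map (fun qi => (PySem.Dict.mk row).get? qi)
        let values := data.foldl
          (fun s other =>
            if quasi_identifiers.map (fun qi => (PySem.Dict.mk other).get? qi) == key then
              match (PySem.Dict.mk other).get? sensitive_attribute with
              | some v => PySem.Set.add s v
              | none => s
            else s)
          PySem.Set.empty
        let d : Int := PySem.Set.len values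
        match best with
        | none => some d
        | some b => if d < b then some d else some b)
      (none : Option Int)).getD 0   -- best is never None here: data ≠ []

-- ===== PRECONDITION & SPEC =====
def Spec_check (data : List (List (String × String))) (quasi_identifiers : List String) (sensitive_attribute : String) (out : Int) : Prop := out = check_alt data quasi_identifiers sensitive_attribute
instance (data : List (List (String × String))) (quasi_identifiers : List String) (sensitive_attribute : String) (out : Int) : Decidable (Spec_check data quasi_identifiers sensitive_attribute out) := by unfold Spec_check; infer_instance

-- ===== CLAIM (what is proved, stated in full; the proofs are below) =====
def Claim_equal_check : Prop := ∀ (data : List (List (String × String))) (quasi_identifiers : List String) (sensitive_attribute : String), Dom_check data quasi_identifiers sensitive_attribute → Spec_check data quasi_identifiers sensitive_attribute (check data quasi_identifiers sensitive_attribute)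

-- ===== LEMMAS AND PROOFS =====

-- diversity of the class with key k: distinct non-None sensitive values of its rows
def pvDiv (data : List (List (String × String))) (quasi_identifiers : List String)
    (sensitive_attribute : String) (k : List (Option String)) : Int :=
  PySem.Set.len
    ((data.filter (fun r => pvKey quasi_identifiers r == k)).foldl
      (fun s r => pvAddSens sensitive_attribute r s) PySem.Set.empty)

-- the plain min fold over a possibly empty list (0 on empty, as A's inf-guard yields)
def pvMinfold (l : List Int) : Int := match l with | [] => 0 | h :: t => t.foldl min h

-- per-row diversity: B's inner rescan of data for the row's own key
def pvDivRow (data : List (List (String × String))) (quasi_identifiers : List String)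
    (sensitive_attribute : String) (row : List (String × String)) : Int :=
  PySem.Set.len
    (data.foldl
      (fun s other =>
        if pvKey quasi_identifiers other == pvKey quasi_identifiers row then
          pvAddSens sensitive_attribute other s
        else s)
      PySem.Set.empty)

-- B's inner loop computes the diversity of the row's class
theorem pvDivRow_eq (data : List (List (String × String))) (quasi_identifiers : List String)
    (sensitive_attribute : String) (row : List (String × String)) :
    pvDivRow data quasi_identifiers sensitive_attribute row
      = pvDiv data quasi_identifiers sensitive_attribute (pvKey quasi_identifiers row) := by
  rw [pvDivRow, pvDiv, PySem.List.foldl_if_eq_foldl_filter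
    (p := fun other => pvKey quasi_identifiers other == pvKey quasi_identifiers row)
    (f := fun s r => pvAddSens sensitive_attribute r s)]

-- getD after a modify-grouping loop = fold of the per-item update over the matching items
theorem foldl_modify_getD {κ β ν : Type} [BEq κ] [LawfulBEq κ] [DecidableEq κ]
    (l : List (κ × β)) (f : β → ν → ν) (d0 : ν) (c : κ) (d : PySem.Dict κ ν) :
    (l.foldl (fun d p => d.modify p.1 d0 (f p.2)) d).getD c d0
      = (l.filter (fun p => p.1 == c)).foldl (fun v p => f p.2 v) (d.getD c d0) := by
  induction l generalizing d with
  | nil => rfl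
  | cons p l ih =>
    simp only [List.foldl_cons, List.filter_cons]
    rw [ih]
    by_cases h : p.1 = c
    · simp [h]
    · simp [h, PySem.Dict.getD_modify, Ne.symm h]

-- items of a nodup-keys dict, reconstructed from keys and getD
theorem items_eq_keys_map {κ ν : Type} [BEq κ] [LawfulBEq κ]
    (d : PySem.Dict κ ν) (d0 : ν) (h : d.keys.Nodup) :
    d.items = d.keys.map (fun k => (k, d.getD k d0)) := by
  have h1 : d.keys.map (fun k => (k, d.getD k d0)) = d.items.map (fun p => (p.1, d.getD p.1 d0)) := by
    simp only [PySem.Dict.keys, List.map_map]; rfl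
  rw [h1]
  symm
  conv_rhs => rw [show d.items = d.items.map id from (List.map_id d.items).symm]
  apply List.map_congr_left
  intro p hp
  have hg := PySem.Dict.getD_of_mem_items (k := p.1) (v := p.2) (d0 := d0) (d := d)
    (by simpa using hp) h
  simp [hg]

-- the running-min loop with an Option accumulator (float('inf') start) is the plain min fold
theorem optmin_fold (l : List Int) :
    (match l.foldl (fun m d => match m with | none => some d | some m0 => some (min m0 d)) (none : Option Int) with
     | none => (0 : Int) | some m0 => m0)
      = match l with | [] => (0 : Int) | h :: t => t.foldl min h := by
  have aux : ∀ (t : List Int) (a : Int),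
      t.foldl (fun m d => match m with | none => some d | some m0 => some (min m0 d)) (some a)
        = some (t.foldl min a) := by
    intro t
    induction t with
    | nil => intro a; rfl
    | cons x t ih => intro a; simp only [List.foldl_cons]; rw [ih]
  cases l with
  | nil => rfl
  | cons h t => simp only [List.foldl_cons]; rw [aux]

-- filter on the second component commutes with projecting it
theorem filter_snd_map_snd {α β : Type} (l : List (α × β)) (q : β → Bool) :
    (l.filter (fun p => q p.2)).map (fun p : α × β => p.2) = (l.map (fun p : α × β => p.2)).filter q := by
  induction l with
  | nil => rfl
  | cons p l ih =>
    by_cases h : q p.2 <;> simp [h, ih]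

-- an enumerate entry looks itself up: data[i] = row for (i, row) in enumerate(data)
theorem enum_lookup (data : List (List (String × String))) :
    ∀ p ∈ PySem.List.enumerate data, PySem.List.pyGetD data p.1 [] = p.2 := by
  intro p hp
  rw [PySem.List.mem_enumerate_iff] at hp
  obtain ⟨k, hk, rfl⟩ := hp
  simp [List.getElem?_eq_getElem hk]

-- A's class of key c: the indices of the rows whose key is c
theorem classesA_getD (data : List (List (String × String))) (quasi_identifiers : List String)
    (c : List (Option String)) :
    (pvClassesA data quasi_identifiers).getD c []
      = ((PySem.List.enumerate data).filter (fun p => pvKey quasi_identifiers p.2 == c)).map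
          (fun p => p.1) := by
  have h := foldl_modify_getD
    (l := (PySem.List.enumerate data).map (fun p => (pvKey quasi_identifiers p.2, p.1)))
    (f := fun i l => l ++ [i]) (d0 := ([] : List Int)) (c := c) (d := PySem.Dict.empty)
  rw [List.foldl_map] at h
  rw [pvClassesA]
  rw [h]
  rw [PySem.List.foldl_append_singleton_eq_map]
  rw [List.filter_map]
  simp [Function.comp_def, PySem.Dict.getD_empty, List.map_map]

-- folding a function of the second component = projecting then folding
theorem foldl_snd {α β γ : Type} (l : List (α × β)) (f : γ → β → γ) (i : γ) :
    l.foldl (fun a p => f a p.2) i = (l.map (fun p : α × β => p.2)).foldl f i := by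
  induction l generalizing i with
  | nil => rfl
  | cons p l ih => simp [List.foldl_cons, ih]

-- A's second scan over a class's indices computes that class's diversity set
theorem sensA_eq (data : List (List (String × String))) (quasi_identifiers : List String)
    (sensitive_attribute : String) (c : List (Option String)) :
    (PySem.Set.len (((pvClassesA data quasi_identifiers).getD c []).foldl
        (fun s idx => pvAddSens sensitive_attribute (PySem.List.pyGetD data idx []) s)
        PySem.Set.empty))
      = pvDiv data quasi_identifiers sensitive_attribute c := by
  rw [classesA_getD]
  rw [List.foldl_map]
  rw [PySem.List.foldl_congr_mem
    (g := fun s (p : Int × List (String × String)) => pvAddSens sensitive_attribute p.2 s)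
    (h := by
      intro acc x hx
      rw [enum_lookup data x (List.mem_of_mem_filter hx)])]
  rw [foldl_snd _ (fun s row => pvAddSens sensitive_attribute row s)]
  rw [filter_snd_map_snd _ (fun row => pvKey quasi_identifiers row == c)]
  rw [PySem.List.map_snd_enumerate]
  rfl

theorem nodup_keysA (data : List (List (String × String))) (quasi_identifiers : List String) :
    (pvClassesA data quasi_identifiers).keys.Nodup := by
  rw [pvClassesA]
  exact PySem.Dict.nodup_keys_foldl_modify_key _ _ _ _ _ (by simp [PySem.Dict.keys_empty])

-- A's key list is set(data.map key) in first-occurrence order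
theorem keysA_eq (data : List (List (String × String))) (quasi_identifiers : List String) :
    (pvClassesA data quasi_identifiers).keys
      = PySem.Set.ofList (data.map (pvKey quasi_identifiers)) := by
  rw [pvClassesA]
  rw [PySem.Dict.keys_foldl_modify_key (key := fun p : Int × List (String × String) => pvKey quasi_identifiers p.2)]
  have : (PySem.List.enumerate data).map (fun p => pvKey quasi_identifiers p.2)
      = data.map (fun row => pvKey quasi_identifiers row) := by
    rw [show (fun p : Int × List (String × String) => pvKey quasi_identifiers p.2)
        = (fun row => pvKey quasi_identifiers row) ∘ (fun p : Int × List (String × String) => p.2) from rfl]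
    rw [← List.map_map, PySem.List.map_snd_enumerate]
  rw [this]
  rfl

-- final assembly of A's min loop over a key list
theorem min_assemble {κ : Type} (K : List κ) (dv : κ → Int) :
    (match K.foldl (fun m k => match m with | none => some (dv k) | some m0 => some (min m0 (dv k)))
        (none : Option Int) with
     | none => (0 : Int) | some m0 => m0)
      = pvMinfold (K.map dv) := by
  have h := optmin_fold (K.map dv)
  rw [List.foldl_map] at h
  exact h

-- the min fold lands on a member of the list
theorem foldl_min_mem (t : List Int) : ∀ h : Int, t.foldl min h ∈ h :: t := by
  induction t with
  | nil => intro h; simp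
  | cons x t ih =>
    intro h
    have := ih (min h x)
    rcases min_choice h x with hc | hc <;>
      (simp only [List.foldl_cons]; rcases List.mem_cons.mp this with h1 | h1)
    · exact List.mem_cons.mpr (Or.inl (h1.trans hc))
    · simp [h1]
    · rw [h1, hc]; simp
    · simp [h1]

-- the min fold is a lower bound of the list
theorem foldl_min_le (t : List Int) : ∀ (h : Int), ∀ x ∈ h :: t, t.foldl min h ≤ x := by
  induction t with
  | nil =>
    intro h x hx
    simp only [List.mem_cons, List.not_mem_nil, or_false] at hx
    subst hx; simp
  | cons y t ih =>
    intro h x hx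
    simp only [List.foldl_cons]
    have hh : t.foldl min (min h y) ≤ min h y := ih (min h y) (min h y) (by simp)
    rcases List.mem_cons.mp hx with rfl | hx'
    · exact le_trans hh (min_le_left _ _)
    · rcases List.mem_cons.mp hx' with rfl | hx''
      · exact le_trans hh (min_le_right _ _)
      · exact ih (min h y) x (List.mem_cons.mpr (Or.inr hx''))

-- nonempty lists with the same members have the same minimum
theorem minfold_ext (l1 l2 : List Int) (h1 : l1 ≠ []) (h2 : l2 ≠ [])
    (hm : ∀ x, x ∈ l1 ↔ x ∈ l2) : pvMinfold l1 = pvMinfold l2 := by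
  cases l1 with
  | nil => exact absurd rfl h1
  | cons a t1 =>
    cases l2 with
    | nil => exact absurd rfl h2
    | cons b t2 =>
      have m1 : t1.foldl min a ∈ b :: t2 := (hm _).mp (foldl_min_mem t1 a)
      have m2 : t2.foldl min b ∈ a :: t1 := (hm _).mpr (foldl_min_mem t2 b)
      simp only [pvMinfold]
      exact le_antisymm (foldl_min_le t1 a _ m2) (foldl_min_le t2 b _ m1)

-- B's update step is the min
theorem step_min (d b : Int) : (if d < b then d else b) = min b d := by
  rw [min_def]; split_ifs <;> omega

-- A as a min over the distinct keys
theorem checkA_min (data : List (List (String × String))) (quasi_identifiers : List String)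
    (sensitive_attribute : String)
    (hguard : ¬(data = [] ∨ quasi_identifiers = [] ∨ sensitive_attribute = "")) :
    check data quasi_identifiers sensitive_attribute
      = pvMinfold ((PySem.Set.ofList (data.map (pvKey quasi_identifiers))).map
            (pvDiv data quasi_identifiers sensitive_attribute)) := by
  simp only [check, if_neg hguard]
  rw [items_eq_keys_map (pvClassesA data quasi_identifiers) [] (nodup_keysA data quasi_identifiers)]
  set K := (pvClassesA data quasi_identifiers).keys with hK
  by_cases hKnil : K = []
  · have hdata : data ≠ [] := by intro h; exact hguard (Or.inl h)
    exfalso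
    have := keysA_eq data quasi_identifiers
    rw [← hK] at this
    cases data with
    | nil => exact hdata rfl
    | cons r rs =>
      rw [hKnil] at this
      simp [PySem.Set.ofList_cons] at this
  · rw [if_neg (by simpa using hKnil)]
    rw [List.foldl_map]
    rw [PySem.List.foldl_congr_mem
      (g := fun (m : Option Int) k =>
        match m with
        | none => some (pvDiv data quasi_identifiers sensitive_attribute k)
        | some m0 => some (min m0 (pvDiv data quasi_identifiers sensitive_attribute k)))
      (h := by
        intro acc x _
        have hs := sensA_eq data quasi_identifiers sensitive_attribute x
        cases acc <;> (simp only []; rw [hs]))]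
    rw [min_assemble K (pvDiv data quasi_identifiers sensitive_attribute)]
    rw [hK, keysA_eq]

-- B as a min over the per-row diversities
theorem checkB_min (data : List (List (String × String))) (quasi_identifiers : List String)
    (sensitive_attribute : String)
    (hguard : ¬(data = [] ∨ quasi_identifiers = [] ∨ sensitive_attribute = "")) :
    check_alt data quasi_identifiers sensitive_attribute
      = pvMinfold (data.map (pvDivRow data quasi_identifiers sensitive_attribute)) := by
  simp only [check_alt, if_neg hguard]
  have e : (data.foldl
      (fun best row =>
        let key := quasi_identifiers.map (fun qi => (PySem.Dict.mk row).get? qi)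
        let values := data.foldl
          (fun s other =>
            if quasi_identifiers.map (fun qi => (PySem.Dict.mk other).get? qi) == key then
              match (PySem.Dict.mk other).get? sensitive_attribute with
              | some v => PySem.Set.add s v
              | none => s
            else s)
          PySem.Set.empty
        let d : Int := PySem.Set.len values
        match best with
        | none => some d
        | some b => if d < b then some d else some b)
      (none : Option Int))
      = (data.foldl
        (fun best row =>
          match best with
          | none => some (pvDivRow data quasi_identifiers sensitive_attribute row)
          | some b =>
            if pvDivRow data quasi_identifiers sensitive_attribute row < b then
              some (pvDivRow data quasi_identifiers sensitive_attribute row)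
            else some b)
        (none : Option Int)) := rfl
  rw [e]
  have hstep : (data.foldl
      (fun best row =>
        match best with
        | none => some (pvDivRow data quasi_identifiers sensitive_attribute row)
        | some b =>
          if pvDivRow data quasi_identifiers sensitive_attribute row < b then
            some (pvDivRow data quasi_identifiers sensitive_attribute row)
          else some b)
      (none : Option Int))
      = (data.foldl
        (fun best row =>
          match best with
          | none => some (pvDivRow data quasi_identifiers sensitive_attribute row)
          | some b => some (min b (pvDivRow data quasi_identifiers sensitive_attribute row)))
        (none : Option Int)) := by
    apply PySem.List.foldl_congr_mem
    intro acc row _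
    cases acc with
    | none => rfl
    | some b =>
      simp only []
      rw [← apply_ite some]
      rw [step_min]
  rw [hstep]
  have h := optmin_fold (data.map (pvDivRow data quasi_identifiers sensitive_attribute))
  rw [List.foldl_map] at h
  cases hfold : (data.foldl
      (fun best row =>
        match best with
        | none => some (pvDivRow data quasi_identifiers sensitive_attribute row)
        | some b => some (min b (pvDivRow data quasi_identifiers sensitive_attribute row)))
      (none : Option Int)) with
  | none => rw [hfold] at h; simpa [pvMinfold] using h
  | some m0 => rw [hfold] at h; simpa [pvMinfold] using h

-- the two min-folds range over the same set of values
theorem members_eq (data : List (List (String × String))) (quasi_identifiers : List String)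
    (sensitive_attribute : String) (x : Int) :
    x ∈ (PySem.Set.ofList (data.map (pvKey quasi_identifiers))).map
          (pvDiv data quasi_identifiers sensitive_attribute)
      ↔ x ∈ data.map (fun row => pvDiv data quasi_identifiers sensitive_attribute
          (pvKey quasi_identifiers row)) := by
  simp only [List.mem_map, PySem.Set.mem_ofList]
  constructor
  · rintro ⟨k, ⟨row, hrow, rfl⟩, rfl⟩
    exact ⟨row, hrow, rfl⟩
  · rintro ⟨row, hrow, rfl⟩
    exact ⟨pvKey quasi_identifiers row, ⟨row, hrow, rfl⟩, rfl⟩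

theorem check_core (data : List (List (String × String))) (quasi_identifiers : List String)
    (sensitive_attribute : String) :
    check data quasi_identifiers sensitive_attribute
      = check_alt data quasi_identifiers sensitive_attribute := by
  by_cases hguard : data = [] ∨ quasi_identifiers = [] ∨ sensitive_attribute = ""
  · simp [check, check_alt, hguard]
  · rw [checkA_min data quasi_identifiers sensitive_attribute hguard,
        checkB_min data quasi_identifiers sensitive_attribute hguard]
    have hdata : data ≠ [] := by intro h; exact hguard (Or.inl h)
    have hmap : data.map (pvDivRow data quasi_identifiers sensitive_attribute)
        = data.map (fun row => pvDiv data quasi_identifiers sensitive_attribute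
            (pvKey quasi_identifiers row)) := by
      apply List.map_congr_left
      intro row _
      exact pvDivRow_eq data quasi_identifiers sensitive_attribute row
    rw [hmap]
    apply minfold_ext
    · cases data with
      | nil => exact absurd rfl hdata
      | cons r rs => simp [PySem.Set.ofList_cons]
    · simpa using hdata
    · exact members_eq data quasi_identifiers sensitive_attribute

-- ===== VERDICT (by name: the statement is the Claim_ definition above) =====
theorem check_spec : Claim_equal_check := by
  intro data qis sa _
  unfold Spec_check
  exact check_core data qis sa
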